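-- pv_equiv track=rewrite | github.com/CJKkkk-315/Python-order-taking-3 | exercise2.py | collect_info_per_month
-- ===== SOURCE A (Python) =====
-- def collect_info_per_month(info, L):
--     res = {}
--     for row in L:
--         if info in row:
--             if row[info]:
--                 date = '/'.join(row['date'].split('/')[:2])
--                 if date in res:
--                     res[date].append(row[info])
--                 else:
--                     res[date] = [row[info]]
--     return res
-- ===== SOURCE B (Python) =====
-- def collect_info_per_month(info, L):
--     # extract (month-key, value) pairs once, then group by first-seen key order
--     pairs = []
--     for row in L:
--         if info in row and row[info]:
--             pairs.append(('/'.join(row['date'].split('/')[:2]), row[info]))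
--     keys = []
--     for k, _ in pairs:
--         if k not in keys:
--             keys.append(k)
--     return {k: [v for k2, v in pairs if k2 == k] for k in keys}
-- ===== Notes on version B (the rewrite author's own statement) =====
-- stated objective: alternative
-- what changed: A builds the result dict in one pass, appending/inserting per row; B first extracts the (month-key, value) pairs, then dedups the keys in first-seen order and builds each month's list by a per-key filter over the pairs.
import Mathlib
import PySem

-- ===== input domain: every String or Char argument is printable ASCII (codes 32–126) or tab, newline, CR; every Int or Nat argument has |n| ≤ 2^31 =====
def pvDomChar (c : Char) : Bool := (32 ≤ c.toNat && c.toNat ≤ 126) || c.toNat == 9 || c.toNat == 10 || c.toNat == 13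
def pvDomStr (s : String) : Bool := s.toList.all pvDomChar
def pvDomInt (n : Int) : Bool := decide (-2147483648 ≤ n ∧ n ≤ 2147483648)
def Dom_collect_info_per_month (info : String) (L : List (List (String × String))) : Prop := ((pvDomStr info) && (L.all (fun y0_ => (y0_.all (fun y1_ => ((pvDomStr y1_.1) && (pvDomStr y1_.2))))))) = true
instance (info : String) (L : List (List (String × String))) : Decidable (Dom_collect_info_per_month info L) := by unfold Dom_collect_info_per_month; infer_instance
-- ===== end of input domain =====

-- B replaces A's one-pass dict accumulation by extract-pairs / dedup-keys / per-key filter (alternative decomposition, same results).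

-- ===== PORT A =====
-- '/'.join(row['date'].split('/')[:2])
def pvMonthA (d : String) : String :=
  PySem.Str.join "/" (((PySem.Str.split? d "/").getD []).take 2)

def collect_info_per_month (info : String) (L : List (List (String × String))) : List (String × List String) :=
  (L.foldl (fun res row =>
      let r := PySem.Dict.ofList row
      match r.get? info with
      | none => res                                   -- 'info in row' is false
      | some v =>
        if v ≠ "" then                                -- 'if row[info]:' (truthy string)
          -- row['date']: Pre_ guarantees the key exists on qualifying rows (KeyError excluded by Pre_)
          let date := pvMonthA ((r.get? "date").getD "")
          if res.contains date then res.modify date [] (fun l => l ++ [v])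
          else res.insert date [v]
        else res) PySem.Dict.empty).items

-- ===== PORT B =====
def pvMonthB (d : String) : String :=
  PySem.Str.join "/" (((PySem.Str.split? d "/").getD []).take 2)

-- the 'pairs' loop of Source B
def pvPairsB (info : String) (L : List (List (String × String))) : List (String × String) :=
  L.foldl (fun ps row =>
      let r := PySem.Dict.ofList row
      match r.get? info with
      | none => ps
      | some v =>
        if v ≠ "" then ps ++ [(pvMonthB ((r.get? "date").getD ""), v)] else ps) []

def collect_info_per_month_alt (info : String) (L : List (List (String × String))) : List (String × List String) :=
  let pairs := pvPairsB info L
  let keys := pairs.foldl (fun ks p => if p.1 ∈ ks then ks else ks ++ [p.1]) []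
  keys.map (fun k => (k, (pairs.filter (fun p => p.1 == k)).map (fun p => p.2)))

-- ===== PRECONDITION & SPEC =====
-- Pre_ excludes exactly the inputs on which the Python raises KeyError: a row whose info value is
-- present and truthy but which has no 'date' key (both A and B raise there).
def Pre_collect_info_per_month (info : String) (L : List (List (String × String))) : Prop :=
  ∀ row ∈ L, (PySem.Dict.ofList row).getD info "" ≠ "" →
    (PySem.Dict.ofList row).contains "date" = true

instance (info : String) (L : List (List (String × String))) : Decidable (Pre_collect_info_per_month info L) := by
  unfold Pre_collect_info_per_month; infer_instance

def pvWitness_collect_info_per_month : String × (List (List (String × String))) :=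
  ("x", [[("x", "a"), ("date", "2020/1/2")], [("y", "b")]])

def Spec_collect_info_per_month (info : String) (L : List (List (String × String))) (out : List (String × List String)) : Prop := out = collect_info_per_month_alt info L
instance (info : String) (L : List (List (String × String))) (out : List (String × List String)) : Decidable (Spec_collect_info_per_month info L out) := by unfold Spec_collect_info_per_month; infer_instance

-- ===== CLAIM (what is proved, stated in full; the proofs are below) =====
def Claim_equal_collect_info_per_month : Prop := ∀ (info : String) (L : List (List (String × String))), Dom_collect_info_per_month info L → Pre_collect_info_per_month info L → Spec_collect_info_per_month info L (collect_info_per_month info L)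

-- ===== LEMMAS AND PROOFS =====

-- the common row → optional (month-key, value) extraction both loops perform
def pvExtract (info : String) (row : List (String × String)) : Option (String × String) :=
  match (PySem.Dict.ofList row).get? info with
  | none => none
  | some v =>
    if v ≠ "" then some (pvMonthA (((PySem.Dict.ofList row).get? "date").getD ""), v) else none

theorem pv_foldl_extract {σ : Type} (info : String) (L : List (List (String × String)))
    (f : σ → String × String → σ) (init : σ) :
    L.foldl (fun acc row => match pvExtract info row with | none => acc | some p => f acc p) init
      = (L.filterMap (pvExtract info)).foldl f init := by
  induction L generalizing init with
  | nil => rfl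
  | cons r t ih =>
    simp only [List.foldl_cons, List.filterMap_cons]
    cases pvExtract info r <;> simp [ih]

theorem pv_A_eq (info : String) (L : List (List (String × String))) :
    collect_info_per_month info L
      = ((L.filterMap (pvExtract info)).foldl
          (fun d p => d.modify p.1 [] (fun l => l ++ [p.2])) PySem.Dict.empty).items := by
  unfold collect_info_per_month
  rw [PySem.List.foldl_congr_mem _ _
      (fun res row => match pvExtract info row with
        | none => res
        | some p => res.modify p.1 [] (fun l => l ++ [p.2])) _ ?_]
  · rw [pv_foldl_extract]
  · intro acc row _
    simp only [pvExtract]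
    cases h : (PySem.Dict.ofList row).get? info with
    | none => rfl
    | some v =>
      by_cases hv : v = ""
      · simp [hv]
      · by_cases hc : acc.contains (pvMonthA (((PySem.Dict.ofList row).get? "date").getD "")) = true
        · simp [hv, hc, PySem.Dict.modify]
        · simp only [Bool.not_eq_true] at hc
          simp [hv, hc, PySem.Dict.modify, PySem.Dict.getD_of_not_contains _ _ hc]

theorem pv_pairs_eq (info : String) (L : List (List (String × String))) :
    pvPairsB info L = L.filterMap (pvExtract info) := by
  unfold pvPairsB
  rw [PySem.List.foldl_congr_mem _ _
      (fun ps row => match pvExtract info row with | none => ps | some p => ps ++ [p]) _ ?_]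
  · rw [pv_foldl_extract, PySem.List.foldl_append_singleton_eq_self]
    simp
  · intro acc row _
    simp only [pvExtract, pvMonthB, pvMonthA]
    cases h : (PySem.Dict.ofList row).get? info with
    | none => rfl
    | some v => by_cases hv : v ≠ "" <;> simp [hv]

theorem pv_keys_eq (ps : List (String × String)) :
    ps.foldl (fun ks p => if p.1 ∈ ks then ks else ks ++ [p.1]) []
      = PySem.Set.ofList (ps.map Prod.fst) := by
  rw [PySem.Set.ofList_eq_foldl, List.foldl_map]
  apply PySem.List.foldl_congr_mem
  intro acc p _
  by_cases h : p.1 ∈ acc <;> simp [PySem.Set.add, PySem.Set.contains, h]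

theorem pv_group (ps : List (String × String)) :
    (ps.foldl (fun d p => d.modify p.1 [] (fun l => l ++ [p.2])) PySem.Dict.empty).items
      = (PySem.Set.ofList (ps.map Prod.fst)).map
          (fun k => (k, (ps.filter (fun p => p.1 == k)).map (fun p => p.2))) := by
  have hnd : (ps.foldl (fun d p => d.modify p.1 [] (fun l => l ++ [p.2])) PySem.Dict.empty).keys.Nodup := by
    apply PySem.Dict.nodup_keys_foldl_modify_key ps Prod.fst [] (fun _ p => fun l => l ++ [p.2])
    simp [pysem]
  rw [PySem.Dict.items_eq_map_keys _ hnd []]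
  rw [PySem.Dict.keys_foldl_modify_key ps Prod.fst [] (fun _ p => fun l => l ++ [p.2])]
  have hkeys : PySem.Set.update (PySem.Dict.empty : PySem.Dict String (List String)).keys (ps.map Prod.fst)
      = PySem.Set.ofList (ps.map Prod.fst) := by
    simp [PySem.Set.update, PySem.Set.ofList_eq_foldl, pysem]
  rw [hkeys]
  apply List.map_congr_left
  intro k _
  rw [PySem.Dict.getD_foldl_modify_append]
  simp [pysem]

-- ===== VERDICT (by name: the statement is the Claim_ definition above) =====
theorem collect_info_per_month_spec : Claim_equal_collect_info_per_month := by
  intro info L _ _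
  unfold Spec_collect_info_per_month
  simp only [collect_info_per_month_alt, pv_A_eq, pv_group, pv_pairs_eq, pv_keys_eq]
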